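-- pv_equiv track=rewrite | github.com/anhkind/aventofcode2025 | Day9/p2.py | find_lines
-- ===== SOURCE A (Python) =====
-- def find_lines(P):
--     X, Y = {}, {}
--     for i, [x, y] in enumerate(P):
--         if x in X:
--             lo, hi = X[x]
--             X[x] = [min(y, lo), max(y, hi)]
--         else: X[x] = [y, y]
--
--         if y in Y:
--             lo, hi = Y[y]
--             Y[y] = [min(x, lo), max(x, hi)]
--         else: Y[y] = [x, x]
--     return (X, Y)
-- ===== SOURCE B (Python) =====
-- def find_lines(P):
--     # Two-phase: collect all ys per x and xs per y, then reduce each group to [min, max].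
--     gx, gy = {}, {}
--     for x, y in P:
--         gx.setdefault(x, []).append(y)
--         gy.setdefault(y, []).append(x)
--     X = {x: [min(ys), max(ys)] for x, ys in gx.items()}
--     Y = {y: [min(xs), max(xs)] for y, xs in gy.items()}
--     return (X, Y)
-- ===== Notes on version B (the rewrite author's own statement) =====
-- stated objective: alternative
-- what changed: A maintains running [min,max] per key inside the loop; B first groups all y-values per x (and x-values per y) with setdefault/append, then reduces each group to [min(ys), max(ys)] in a second comprehension phase.
import Mathlib
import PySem

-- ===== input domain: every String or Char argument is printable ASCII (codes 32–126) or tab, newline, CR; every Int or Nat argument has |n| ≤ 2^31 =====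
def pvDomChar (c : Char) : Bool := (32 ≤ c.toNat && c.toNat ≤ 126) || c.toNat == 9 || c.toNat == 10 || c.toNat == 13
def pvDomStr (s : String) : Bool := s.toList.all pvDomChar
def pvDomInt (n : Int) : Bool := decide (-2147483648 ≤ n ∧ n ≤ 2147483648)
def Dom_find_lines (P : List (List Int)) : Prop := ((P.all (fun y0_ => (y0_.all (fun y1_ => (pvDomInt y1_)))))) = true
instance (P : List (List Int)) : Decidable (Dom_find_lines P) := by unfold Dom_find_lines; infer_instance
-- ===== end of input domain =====

-- B replaces A's incremental per-point min/max maintenance by a two-phase collect-then-reduce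
-- (group every y per x and every x per y, then reduce each group to [min, max]); same cost class, alternative decomposition.

-- ===== PORT A =====
-- one dict update of A's loop body: if k in d: lo, hi = d[k]; d[k] = [min(v, lo), max(v, hi)] else: d[k] = [v, v]
def updA (d : PySem.Dict Int (List Int)) (k v : Int) : PySem.Dict Int (List Int) :=
  match d.get? k with
  | some (lo :: hi :: _) => d.insert k [min v lo, max v hi]
  | _ => d.insert k [v, v]

-- loop body of A (the `_` arm is unreachable under Pre_: rows have length 2; Python raises otherwise)
def stepA (S : PySem.Dict Int (List Int) × PySem.Dict Int (List Int)) (row : List Int) :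
    PySem.Dict Int (List Int) × PySem.Dict Int (List Int) :=
  match row with
  | [x, y] => (updA S.1 x y, updA S.2 y x)
  | _ => S

def find_lines (P : List (List Int)) : (List (Int × List Int)) × (List (Int × List Int)) :=
  let S := P.foldl stepA (PySem.Dict.empty, PySem.Dict.empty)
  (S.1.items, S.2.items)

-- ===== PORT B =====
-- g.setdefault(k, []).append(v)
def updB (g : PySem.Dict Int (List Int)) (k v : Int) : PySem.Dict Int (List Int) :=
  g.modify k [] (fun ys => ys ++ [v])

-- min(ys) / max(ys) of a Python list (ys nonempty in every use)
def pvMin (ys : List Int) : Int := (PySem.List.min? ys id).getD 0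
def pvMax (ys : List Int) : Int := (PySem.List.max? ys id).getD 0

def redP (p : Int × List Int) : Int × List Int := (p.1, [pvMin p.2, pvMax p.2])

-- {k: [min(vs), max(vs)] for k, vs in g.items()}
def reduceG (g : PySem.Dict Int (List Int)) : List (Int × List Int) := g.items.map redP

-- loop body of B's collect phase (non-2 rows unreachable under Pre_)
def stepB (S : PySem.Dict Int (List Int) × PySem.Dict Int (List Int)) (row : List Int) :
    PySem.Dict Int (List Int) × PySem.Dict Int (List Int) :=
  match row with
  | [] => S
  | [_] => S
  | [x, y] => (updB S.1 x y, updB S.2 y x)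
  | _ :: _ :: _ :: _ => S

def find_lines_alt (P : List (List Int)) : (List (Int × List Int)) × (List (Int × List Int)) :=
  let G := P.foldl stepB (PySem.Dict.empty, PySem.Dict.empty)
  (reduceG G.1, reduceG G.2)

-- ===== PRECONDITION & SPEC =====
-- Pre_ excludes rows whose length is not exactly 2: there Python's `for i, [x, y] in enumerate(P)` raises ValueError (both in A and in B's `for x, y in P`).
def Pre_find_lines (P : List (List Int)) : Prop := ∀ r ∈ P, r.length = 2
instance (P : List (List Int)) : Decidable (Pre_find_lines P) := by unfold Pre_find_lines; infer_instance

def pvWitness_find_lines : List (List Int) := [[1, 2], [1, 5], [3, 2], [0, 5]]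

def Spec_find_lines (P : List (List Int)) (out : (List (Int × List Int)) × (List (Int × List Int))) : Prop := out = find_lines_alt P
instance (P : List (List Int)) (out : (List (Int × List Int)) × (List (Int × List Int))) : Decidable (Spec_find_lines P out) := by unfold Spec_find_lines; infer_instance

-- ===== CLAIM (what is proved, stated in full; the proofs are below) =====
def Claim_equal_find_lines : Prop := ∀ (P : List (List Int)), Dom_find_lines P → Pre_find_lines P → Spec_find_lines P (find_lines P)

-- ===== LEMMAS AND PROOFS =====

-- invariant: A's running dict is B's group dict with every group reduced to [min, max];
-- groups are nonempty and keys unique.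
def InvD (d g : PySem.Dict Int (List Int)) : Prop :=
  d = PySem.Dict.mk (g.items.map redP) ∧ (∀ p ∈ g.items, p.2 ≠ []) ∧ g.keys.Nodup

theorem min?_cons_foldl (t : List Int) : ∀ h : Int, PySem.List.min? (h :: t) id = some (t.foldl min h) := by
  induction t with
  | nil => intro h; rfl
  | cons x t ih =>
    intro h
    have step : PySem.List.min? (h :: x :: t) id = PySem.List.min? (min h x :: t) id := by
      simp only [PySem.List.min?, List.foldl_cons]
      congr 1
      simp only [id, min_def]
      split_ifs <;> (first | rfl | (simp only [Option.some.injEq]; omega))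
    rw [step, ih (min h x), List.foldl_cons]

theorem max?_cons_foldl (t : List Int) : ∀ h : Int, PySem.List.max? (h :: t) id = some (t.foldl max h) := by
  induction t with
  | nil => intro h; rfl
  | cons x t ih =>
    intro h
    have step : PySem.List.max? (h :: x :: t) id = PySem.List.max? (max h x :: t) id := by
      simp only [PySem.List.max?, List.foldl_cons]
      congr 1
      simp only [id, max_def]
      split_ifs <;> (first | rfl | (simp only [Option.some.injEq]; omega))
    rw [step, ih (max h x), List.foldl_cons]

theorem pvMin_cons (h : Int) (t : List Int) : pvMin (h :: t) = t.foldl min h := by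
  simp [pvMin, min?_cons_foldl]

theorem pvMax_cons (h : Int) (t : List Int) : pvMax (h :: t) = t.foldl max h := by
  simp [pvMax, max?_cons_foldl]

theorem pvMin_append (l : List Int) (v : Int) (h : l ≠ []) :
    pvMin (l ++ [v]) = min v (pvMin l) := by
  cases l with
  | nil => exact absurd rfl h
  | cons a t =>
    rw [List.cons_append, pvMin_cons, pvMin_cons, List.foldl_append]
    simp [min_comm]

theorem pvMax_append (l : List Int) (v : Int) (h : l ≠ []) :
    pvMax (l ++ [v]) = max v (pvMax l) := by
  cases l with
  | nil => exact absurd rfl h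
  | cons a t =>
    rw [List.cons_append, pvMax_cons, pvMax_cons, List.foldl_append]
    simp [max_comm]

theorem get?_mk_map_redP (l : List (Int × List Int)) (k : Int) :
    (PySem.Dict.mk (l.map redP)).get? k =
      ((PySem.Dict.mk l).get? k).map (fun ys => [pvMin ys, pvMax ys]) := by
  induction l with
  | nil => rfl
  | cons p l ih =>
    obtain ⟨a, ys⟩ := p
    simp only [List.map_cons, PySem.Dict.get?_mk_cons, redP]
    cases h : (a == k) <;> simp [ih]

theorem step_inv (d g : PySem.Dict Int (List Int)) (k v : Int) (h : InvD d g) :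
    InvD (updA d k v) (updB g k v) := by
  obtain ⟨hd, hne, hnd⟩ := h
  have hmodify : updB g k v = g.insert k (g.getD k [] ++ [v]) := rfl
  have hdget : d.get? k = (g.get? k).map (fun ys => [pvMin ys, pvMax ys]) := by
    rw [hd, get?_mk_map_redP]
  cases hgk : g.get? k with
  | none =>
    have hdk : d.get? k = none := by rw [hdget, hgk]; rfl
    have hcontg : g.contains k = false := by rw [PySem.Dict.contains_eq_isSome_get?, hgk]; rfl
    have hcontd : d.contains k = false := by rw [PySem.Dict.contains_eq_isSome_get?, hdk]; rfl
    have hgetD : g.getD k [] = [] := PySem.Dict.getD_of_get?_eq_none g [] hgk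
    have hA : updA d k v = d.insert k [v, v] := by unfold updA; rw [hdk]
    refine ⟨?_, ?_, ?_⟩
    · apply PySem.Dict.ext
      rw [hA, hmodify, hgetD]
      rw [PySem.Dict.items_insert_of_not_contains d _ hcontd, PySem.Dict.items_insert_of_not_contains g _ hcontg]
      rw [List.map_append, hd]
      rfl
    · intro p hp
      rw [hmodify, hgetD] at hp
      rcases (PySem.Dict.mem_items_insert _ _ _ _).mp hp with h1 | h2
      · subst h1; simp
      · exact hne _ h2.1
    · rw [hmodify]; exact PySem.Dict.nodup_keys_insert g _ _ hnd
  | some ys =>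
    have hys : ys ≠ [] := hne (k, ys) (PySem.Dict.mem_items_of_get?_eq_some g hgk)
    have hdk : d.get? k = some [pvMin ys, pvMax ys] := by rw [hdget, hgk]; rfl
    have hcontg : g.contains k = true := by rw [PySem.Dict.contains_eq_isSome_get?, hgk]; rfl
    have hcontd : d.contains k = true := by rw [PySem.Dict.contains_eq_isSome_get?, hdk]; rfl
    have hgetD : g.getD k [] = ys := PySem.Dict.getD_of_get?_eq_some g [] hgk
    have hA : updA d k v = d.insert k [min v (pvMin ys), max v (pvMax ys)] := by unfold updA; rw [hdk]
    refine ⟨?_, ?_, ?_⟩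
    · apply PySem.Dict.ext
      rw [hA, hmodify, hgetD]
      rw [PySem.Dict.items_insert_of_contains d _ hcontd, PySem.Dict.items_insert_of_contains g _ hcontg]
      rw [hd]
      simp only [List.map_map]
      apply List.map_congr_left
      intro p hp
      obtain ⟨a, zs⟩ := p
      by_cases hak : a = k
      · subst hak
        simp [redP, pvMin_append _ _ hys, pvMax_append _ _ hys]
      · simp [redP, hak]
    · intro p hp
      rw [hmodify, hgetD] at hp
      rcases (PySem.Dict.mem_items_insert _ _ _ _).mp hp with h1 | h2
      · subst h1; simp
      · exact hne _ h2.1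
    · rw [hmodify]; exact PySem.Dict.nodup_keys_insert g _ _ hnd

theorem fold_inv (P : List (List Int)) : ∀ (X Y gx gy : PySem.Dict Int (List Int)),
    InvD X gx → InvD Y gy →
    InvD (P.foldl stepA (X, Y)).1 (P.foldl stepB (gx, gy)).1 ∧
    InvD (P.foldl stepA (X, Y)).2 (P.foldl stepB (gx, gy)).2 := by
  induction P with
  | nil => intro X Y gx gy hx hy; exact ⟨hx, hy⟩
  | cons row P ih =>
    intro X Y gx gy hx hy
    rcases row with _ | ⟨x, _ | ⟨y, _ | ⟨z, rest⟩⟩⟩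
    · exact ih X Y gx gy hx hy
    · exact ih X Y gx gy hx hy
    · exact ih (updA X x y) (updA Y y x) (updB gx x y) (updB gy y x)
        (step_inv X gx x y hx) (step_inv Y gy y x hy)
    · exact ih X Y gx gy hx hy

theorem invD_empty : InvD PySem.Dict.empty PySem.Dict.empty :=
  ⟨rfl, by intro p hp; simp [PySem.Dict.empty] at hp, by simp [PySem.Dict.keys, PySem.Dict.empty]⟩

-- ===== VERDICT (by name: the statement is the Claim_ definition above) =====
theorem find_lines_spec : Claim_equal_find_lines := by
  intro P _ _
  unfold Spec_find_lines find_lines find_lines_alt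
  obtain ⟨⟨hd1, -, -⟩, ⟨hd2, -, -⟩⟩ :=
    fold_inv P PySem.Dict.empty PySem.Dict.empty PySem.Dict.empty PySem.Dict.empty invD_empty invD_empty
  dsimp only
  rw [hd1, hd2]
  rfl
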